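-- pv_equiv track=rewrite | github.com/brian-l-johnson/adventofcode-2023 | day14/challeng2.py | shiftSouth
-- ===== SOURCE A (Python) =====
-- import copy
--
-- def findFreeSouth(board, r:int, c:int):
--     blocked = False
--     max = len(board)
--     while not blocked:
--         if r == max-1:
--             blocked = True
--         elif board[r+1][c] != '.':
--             blocked = True
--         else:
--             r+=1
--     return r
--
-- def shiftSouth(board):
--     newBoard = copy.deepcopy(board)
--     for i in reversed(range(len(board))):
--         for j in range(len(board[i])):
--             if newBoard[i][j] == "O":
--                 newLoc = findFreeSouth(newBoard, i, j)
--                 newBoard[i][j] = "."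
--                 newBoard[newLoc][j] = "O"
--     return newBoard
-- ===== SOURCE B (Python) =====
-- # One pass per column instead of A's per-rock downward rescan: each run of '.'/'O'
-- # cells between blockers is rebuilt with its 'O's at the bottom.  Ragged rows are
-- # padded with "" (a blocker, like the board edge) and output rows keep their lengths.
-- def _tilt_col(col):
--     out, seg = [], []
--     for cell in col:
--         if cell == "." or cell == "O":
--             seg.append(cell)
--         else:
--             k = seg.count("O")
--             out += ["."] * (len(seg) - k) + ["O"] * k + [cell]
--             seg = []
--     k = seg.count("O")
--     out += ["."] * (len(seg) - k) + ["O"] * k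
--     return out
--
-- def shiftSouth(board):
--     width = max((len(row) for row in board), default=0)
--     cols = [_tilt_col([row[j] if j < len(row) else "" for row in board])
--             for j in range(width)]
--     return [[cols[j][i] for j in range(len(board[i]))] for i in range(len(board))]
-- ===== Notes on version B (the rewrite author's own statement) =====
-- stated objective: faster
-- what changed: A repeatedly rescans downward for each rock (per-rock while-loop inside a bottom-up sweep); B makes a single pass per column, rebuilding each run of '.'/'O' cells between blockers with its O's at the bottom (ragged rows are padded with a sentinel blocker and output rows keep their lengths).
import Mathlib
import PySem

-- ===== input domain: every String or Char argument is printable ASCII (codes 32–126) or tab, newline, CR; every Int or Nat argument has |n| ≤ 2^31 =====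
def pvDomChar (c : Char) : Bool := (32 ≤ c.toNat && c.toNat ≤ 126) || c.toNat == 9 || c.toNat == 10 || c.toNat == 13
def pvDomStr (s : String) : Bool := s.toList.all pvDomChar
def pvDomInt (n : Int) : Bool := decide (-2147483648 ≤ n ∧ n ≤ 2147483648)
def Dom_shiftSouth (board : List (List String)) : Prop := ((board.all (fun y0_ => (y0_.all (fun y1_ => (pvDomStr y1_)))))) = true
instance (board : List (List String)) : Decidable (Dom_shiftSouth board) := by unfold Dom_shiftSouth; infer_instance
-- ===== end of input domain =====

-- B replaces A's per-rock downward rescans by a single pass per column (each run of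
-- '.'/'O' cells between blockers is rebuilt with its 'O's at the bottom); ragged rows
-- are padded with "" (a blocker, like the board edge) and output rows keep their lengths.

-- ===== PORT A =====
-- the while-loop of findFreeSouth, with fuel (the Python loop advances r fewer than
-- len(board) times before 'blocked'; the port passes fuel = len(board), which suffices)
def pvFfs (board : List (List String)) (mx : Nat) : Nat → Nat → Nat → Nat
  | 0, r, _ => r
  | fuel + 1, r, c =>
    if r = mx - 1 then r
    else if ((board.getD (r+1) []).getD c "") ≠ "." then r
    else pvFfs board mx fuel (r+1) c

def findFreeSouth (board : List (List String)) (r c : Nat) : Nat :=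
  pvFfs board board.length board.length r c

-- newBoard[i][j] = v  (the indices written to are always in range on Pre_ inputs)
def pvSetCell (b : List (List String)) (i j : Nat) (v : String) : List (List String) :=
  b.set i ((b.getD i []).set j v)

-- A's inner 'for j in range(len(board[i]))' loop
def pvInner (nb : List (List String)) (i m : Nat) : List (List String) :=
  (List.range m).foldl (fun nb j =>
    if (nb.getD i []).getD j "" = "O" then
      pvSetCell (pvSetCell nb i j ".") (findFreeSouth nb i j) j "O"
    else nb) nb

def shiftSouth (board : List (List String)) : List (List String) :=
  (List.range board.length).reverse.foldl
    (fun nb i => pvInner nb i ((board.getD i []).length)) board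

-- ===== PORT B =====
-- '["."] * (len(seg) - k) + ["O"] * k' for a finished '.'/'O' run
def tiltSeg (seg : List String) : List String :=
  List.replicate (seg.length - seg.count "O") "." ++ List.replicate (seg.count "O") "O"

-- the loop of _tilt_col: accumulate the current run, flush it at each blocker
def tiltGo : List String → List String → List String
  | seg, [] => tiltSeg seg
  | seg, c :: cs =>
    if c = "." ∨ c = "O" then tiltGo (seg ++ [c]) cs
    else tiltSeg seg ++ c :: tiltGo [] cs

def tiltCol (col : List String) : List String := tiltGo [] col

-- '[row[j] if j < len(row) else "" for row in board]'
def pvGetCol (board : List (List String)) (j : Nat) : List String :=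
  board.map (fun row => row.getD j "")

-- 'max((len(row) for row in board), default=0)'
def pvWidth (board : List (List String)) : Nat :=
  board.foldl (fun a row => max a row.length) 0

def shiftSouth_alt (board : List (List String)) : List (List String) :=
  let cols := (List.range (pvWidth board)).map (fun j => tiltCol (pvGetCol board j))
  (List.range board.length).map (fun i =>
    (List.range ((board.getD i []).length)).map (fun j => (cols.getD j []).getD i ""))

-- ===== PRECONDITION & SPEC =====
-- A raises IndexError exactly when some rock 'O' sits on a run of existing '.'/'O'
-- cells of its column that ends just above a row too short for that column (the scan
-- then reads the missing cell); Pre_ is the negation of that condition, i.e. exactly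
-- the inputs on which A returns normally.
def pvRaises (board : List (List String)) : Prop :=
  ∃ i < board.length, ∃ j < (board.getD i []).length, ∃ b < board.length,
    i ≤ b ∧ b + 1 < board.length ∧
    (board.getD i []).getD j "" = "O" ∧
    (∀ r < board.length, i < r → r ≤ b → j < (board.getD r []).length ∧
      ((board.getD r []).getD j "" = "." ∨ (board.getD r []).getD j "" = "O")) ∧
    (board.getD (b+1) []).length ≤ j

def Pre_shiftSouth (board : List (List String)) : Prop := ¬ pvRaises board

instance (board : List (List String)) : Decidable (Pre_shiftSouth board) := by
  unfold Pre_shiftSouth pvRaises; infer_instance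

def pvWitness_shiftSouth : List (List String) := [["O", "."], [".", "#"]]

def Spec_shiftSouth (board : List (List String)) (out : List (List String)) : Prop := out = shiftSouth_alt board
instance (board : List (List String)) (out : List (List String)) : Decidable (Spec_shiftSouth board out) := by unfold Spec_shiftSouth; infer_instance

-- ===== CLAIM (what is proved, stated in full; the proofs are below) =====
def Claim_equal_shiftSouth : Prop := ∀ (board : List (List String)), Dom_shiftSouth board → Pre_shiftSouth board → Spec_shiftSouth board (shiftSouth board)

-- ===== LEMMAS AND PROOFS =====

-- number of leading "." cells
def ld (l : List String) : Nat := (l.takeWhile (fun x => x == ".")).length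

-- what one iteration of A's inner loop does to the touched column (closed form)
def colStep (col : List String) (i : Nat) : List String :=
  if col.getD i "" = "O" then (col.set i ".").set (i + ld (col.drop (i+1))) "O" else col

-- A's cumulative effect on one column
def colPass (col : List String) : List String :=
  (List.range col.length).reverse.foldl colStep col

-- ---------- small bridges ----------

lemma len_col (b : List (List String)) (c : Nat) : (pvGetCol b c).length = b.length := by
  simp [pvGetCol]

lemma getD_col (b : List (List String)) (c k : Nat) :
    (pvGetCol b c).getD k "" = (b.getD k []).getD c "" := by
  cases h : b[k]? with
  | none => simp [pvGetCol, List.getD_eq_getElem?_getD, List.getElem?_map, h]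
  | some row => simp [pvGetCol, List.getD_eq_getElem?_getD, List.getElem?_map, h]

lemma ld_le (l : List String) : ld l ≤ l.length := by
  simpa [ld] using (List.takeWhile_sublist (p := fun x => x == ".") (l := l)).length_le

lemma getD_eq_getElem_of_lt {α : Type} (l : List α) {k : Nat} (h : k < l.length) (d : α) :
    l.getD k d = l[k] := by
  rw [List.getD_eq_getElem?_getD, List.getElem?_eq_getElem h]; rfl

lemma getD_eq_empty_of_ge (l : List String) {k : Nat} (h : l.length ≤ k) :
    l.getD k "" = "" := by
  rw [List.getD_eq_getElem?_getD, List.getElem?_eq_none h]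
  rfl

lemma getD_drop (l : List String) (n k : Nat) :
    (l.drop n).getD k "" = l.getD (n + k) "" := by
  rw [List.getD_eq_getElem?_getD, List.getD_eq_getElem?_getD, List.getElem?_drop]

lemma ld_pos_cell (l : List String) : ∀ {k : Nat}, k < ld l → l.getD k "" = "." := by
  induction l with
  | nil => intro k hk; simp [ld] at hk
  | cons x xs ih =>
    intro k hk
    by_cases hx : (x == ".") = true
    · have hx' : x = "." := by simpa using hx
      cases k with
      | zero => simp [hx']
      | succ k =>
        have hk' : k < ld xs := by
          simp only [ld, List.takeWhile_cons, hx, if_true, List.length_cons] at hk ⊢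
          omega
        simpa using ih hk'
    · exfalso
      have h0 : ld (x :: xs) = 0 := by
        simp [ld, hx]
      omega

-- ---------- closed form of findFreeSouth ----------

lemma pvFfs_closed (b : List (List String)) (c : Nat) :
    ∀ fuel r, r < b.length → b.length - 1 - r ≤ fuel →
      pvFfs b b.length fuel r c = r + ld ((pvGetCol b c).drop (r+1)) := by
  intro fuel
  induction fuel with
  | zero =>
    intro r hr hf
    have hlen : (pvGetCol b c).length ≤ r + 1 := by rw [len_col]; omega
    rw [List.drop_eq_nil_of_le hlen]
    simp [pvFfs, ld]
  | succ fuel ih =>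
    intro r hr hf
    have hun : pvFfs b b.length (fuel+1) r c =
        (if r = b.length - 1 then r
         else if ((b.getD (r+1) []).getD c "") ≠ "." then r
         else pvFfs b b.length fuel (r+1) c) := rfl
    by_cases h1 : r = b.length - 1
    · rw [hun, if_pos h1, List.drop_eq_nil_of_le (by rw [len_col]; omega)]
      simp [ld]
    · have hr1 : r + 1 < b.length := by omega
      have hlen1 : r + 1 < (pvGetCol b c).length := by rw [len_col]; exact hr1
      have hget : (b.getD (r+1) []).getD c "" = (pvGetCol b c)[r+1] := by
        rw [← getD_col, getD_eq_getElem_of_lt _ hlen1]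
      have hdrop := List.drop_eq_getElem_cons hlen1
      by_cases h2 : (b.getD (r+1) []).getD c "" = "."
      · have hx : (pvGetCol b c)[r+1] = "." := by rw [← hget]; exact h2
        rw [hun, if_neg h1, if_neg (fun hn => hn h2), ih (r+1) hr1 (by omega), hdrop]
        have hTW : List.takeWhile (fun x => x == ".")
              ((pvGetCol b c)[r+1] :: (pvGetCol b c).drop (r+1+1)) =
            (pvGetCol b c)[r+1] ::
              List.takeWhile (fun x => x == ".") ((pvGetCol b c).drop (r+1+1)) := by
          rw [List.takeWhile_cons_of_pos]
          simp [hx]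
        simp only [ld, hTW, List.length_cons]
        omega
      · have hx : ((pvGetCol b c)[r+1] == ".") = false :=
          beq_eq_false_iff_ne.mpr (by rw [← hget]; exact h2)
        rw [hun, if_neg h1, if_pos h2, hdrop]
        simp [ld, hx]

lemma findFreeSouth_closed (b : List (List String)) {r : Nat} (c : Nat) (hr : r < b.length) :
    findFreeSouth b r c = r + ld ((pvGetCol b c).drop (r+1)) := by
  exact pvFfs_closed b c b.length r hr (by omega)

lemma ffs_lt {b : List (List String)} {r : Nat} (c : Nat) (hr : r < b.length) :
    r + ld ((pvGetCol b c).drop (r+1)) < b.length := by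
  have h1 := ld_le ((pvGetCol b c).drop (r+1))
  have h2 : ((pvGetCol b c).drop (r+1)).length = (pvGetCol b c).length - (r+1) := by
    simp
  rw [len_col] at h2
  omega
-- ---------- pvSetCell: shape and columns ----------

lemma setCell_length (b : List (List String)) (i j : Nat) (v : String) :
    (pvSetCell b i j v).length = b.length := by
  simp [pvSetCell]

lemma setCell_rowLen (b : List (List String)) (i j : Nat) (v : String) (k : Nat) :
    ((pvSetCell b i j v).getD k []).length = (b.getD k []).length := by
  by_cases hik : k = i
  · subst hik
    by_cases hk : k < b.length
    · have : (pvSetCell b k j v).getD k [] = (b.getD k []).set j v := by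
        rw [pvSetCell, List.getD_eq_getElem?_getD, List.getElem?_set_self]
        · rfl
        · exact hk
      rw [this, List.length_set]
    · rw [pvSetCell, List.set_eq_of_length_le (by omega)]
  · rw [pvSetCell, List.getD_eq_getElem?_getD, List.getElem?_set_ne (fun h => hik h.symm),
      List.getD_eq_getElem?_getD]

lemma col_setCell_self {b : List (List String)} {i j : Nat}
    (hj : j < (b.getD i []).length) (v : String) :
    pvGetCol (pvSetCell b i j v) j = (pvGetCol b j).set i v := by
  have hjj : j < ((b.getD i []).set j v).length := by rw [List.length_set]; exact hj
  simp only [pvSetCell, pvGetCol, List.map_set]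
  rw [getD_eq_getElem_of_lt _ hjj, List.getElem_set_self]

lemma col_setCell_other {b : List (List String)} {i : Nat} (j : Nat) (hi : i < b.length)
    {c : Nat} (hc : c ≠ j) (v : String) :
    pvGetCol (pvSetCell b i j v) c = pvGetCol b c := by
  have hgd : b.getD i [] = b[i] := by
    rw [List.getD_eq_getElem?_getD, List.getElem?_eq_getElem hi]; rfl
  have hval : ((b.getD i []).set j v).getD c "" = (b.getD i []).getD c "" := by
    simp only [List.getD_eq_getElem?_getD]
    rw [List.getElem?_set_ne (by omega)]
  simp only [pvSetCell, pvGetCol, List.map_set, hval]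
  have him : i < (b.map (fun row => row.getD c "")).length := by simpa using hi
  have : (b.getD i []).getD c "" = (b.map (fun row => row.getD c ""))[i] := by
    rw [hgd]; simp
  rw [this, List.set_getElem_self]

-- ---------- the inner loop, column by column ----------

lemma inner_cols {nb : List (List String)} {i : Nat} (hi : i < nb.length) : ∀ t,
    (pvInner nb i t).length = nb.length ∧
      (∀ k, ((pvInner nb i t).getD k []).length = (nb.getD k []).length) ∧
      ∀ c, pvGetCol (pvInner nb i t) c =
        if c < t then colStep (pvGetCol nb c) i else pvGetCol nb c := by
  intro t
  induction t with
  | zero =>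
    exact ⟨by simp [pvInner], fun k => by simp [pvInner], fun c => by simp [pvInner]⟩
  | succ t ih =>
    obtain ⟨hLen, hRows, hcols⟩ := ih
    have hstep : pvInner nb i (t+1) =
        (if ((pvInner nb i t).getD i []).getD t "" = "O" then
          pvSetCell (pvSetCell (pvInner nb i t) i t ".")
            (findFreeSouth (pvInner nb i t) i t) t "O"
        else pvInner nb i t) := by
      unfold pvInner
      rw [List.range_succ, List.foldl_append]
      simp only [List.foldl_cons, List.foldl_nil]
    have hcolS : pvGetCol (pvInner nb i t) t = pvGetCol nb t := by
      rw [hcols, if_neg (lt_irrefl t)]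
    have hcond : ((pvInner nb i t).getD i []).getD t "" = (pvGetCol nb t).getD i "" := by
      rw [← getD_col, hcolS]
    by_cases hO : (pvGetCol nb t).getD i "" = "O"
    · have hiS : i < (pvInner nb i t).length := by rw [hLen]; exact hi
      have hj : t < ((pvInner nb i t).getD i []).length := by
        by_contra hge
        have h8 := getD_eq_empty_of_ge ((pvInner nb i t).getD i []) (le_of_not_gt hge)
        rw [hcond] at h8
        rw [h8] at hO
        exact absurd hO (by decide)
      have hffs : findFreeSouth (pvInner nb i t) i t =
          i + ld ((pvGetCol nb t).drop (i+1)) := by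
        rw [findFreeSouth_closed _ t hiS, hcolS]
      have hw : i + ld ((pvGetCol nb t).drop (i+1)) < (pvInner nb i t).length := by
        have h5 := ffs_lt (b := pvInner nb i t) (r := i) t hiS
        rw [hcolS] at h5
        exact h5
      have hwj : t < ((pvInner nb i t).getD (i + ld ((pvGetCol nb t).drop (i+1))) []).length := by
        rcases Nat.eq_zero_or_pos (ld ((pvGetCol nb t).drop (i+1))) with h0 | hpos
        · rw [h0]
          simpa using hj
        · have h7 : (ld ((pvGetCol nb t).drop (i+1)) - 1) < ld ((pvGetCol nb t).drop (i+1)) := by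
            omega
          have h8 := ld_pos_cell ((pvGetCol nb t).drop (i+1)) h7
          rw [getD_drop] at h8
          have h9 : ((pvInner nb i t).getD (i + ld ((pvGetCol nb t).drop (i+1))) []).getD t ""
              = "." := by
            rw [← getD_col, hcolS,
              show i + ld ((pvGetCol nb t).drop (i+1)) =
                (i+1) + (ld ((pvGetCol nb t).drop (i+1)) - 1) by omega]
            exact h8
          by_contra hge
          rw [getD_eq_empty_of_ge _ (le_of_not_gt hge)] at h9
          exact absurd h9 (by decide)
      have hbody : pvInner nb i (t+1) =
          pvSetCell (pvSetCell (pvInner nb i t) i t ".")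
            (i + ld ((pvGetCol nb t).drop (i+1))) t "O" := by
        rw [hstep]
        simp only [hcond]
        rw [if_pos hO, hffs]
      have hiS1 : i + ld ((pvGetCol nb t).drop (i+1)) <
          (pvSetCell (pvInner nb i t) i t ".").length := by
        rw [setCell_length]; exact hw
      have hwj1 : t < ((pvSetCell (pvInner nb i t) i t ".").getD
          (i + ld ((pvGetCol nb t).drop (i+1))) []).length := by
        rw [setCell_rowLen]; exact hwj
      refine ⟨?_, fun k => ?_, fun c => ?_⟩
      · rw [hbody, setCell_length, setCell_length, hLen]
      · rw [hbody, setCell_rowLen, setCell_rowLen, hRows k]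
      · rw [hbody]
        by_cases hct : c = t
        · subst hct
          rw [col_setCell_self hwj1 "O", col_setCell_self hj ".", hcolS,
            if_pos (Nat.lt_succ_self c)]
          simp only [colStep]
          rw [if_pos hO]
        · rw [col_setCell_other t hiS1 hct "O", col_setCell_other t hiS hct ".", hcols]
          by_cases hclt : c < t
          · rw [if_pos hclt, if_pos (by omega : c < t + 1)]
          · rw [if_neg hclt, if_neg (by omega : ¬ c < t + 1)]
    · have hbody : pvInner nb i (t+1) = pvInner nb i t := by
        rw [hstep]
        simp only [hcond]
        rw [if_neg hO]
      refine ⟨by rw [hbody]; exact hLen, fun k => by rw [hbody]; exact hRows k, fun c => ?_⟩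
      rw [hbody, hcols]
      by_cases hct : c = t
      · subst hct
        rw [if_neg (lt_irrefl c), if_pos (Nat.lt_succ_self c)]
        simp only [colStep]
        rw [if_neg hO]
      · by_cases hclt : c < t
        · rw [if_pos hclt, if_pos (by omega : c < t + 1)]
        · rw [if_neg hclt, if_neg (by omega : ¬ c < t + 1)]

-- a row index whose row lacks column c leaves that column unchanged
lemma colStep_id_of_ge {nb : List (List String)} {t c : Nat}
    (h : (nb.getD t []).length ≤ c) : colStep (pvGetCol nb c) t = pvGetCol nb c := by
  simp only [colStep]
  rw [if_neg]
  intro heq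
  rw [getD_col, getD_eq_empty_of_ge _ h] at heq
  exact absurd heq (by decide)

-- ---------- the outer loop, column by column ----------

lemma outer_cols {board : List (List String)} :
    ∀ t, t ≤ board.length → ∀ nb, nb.length = board.length →
      (∀ k, (nb.getD k []).length = (board.getD k []).length) →
      ((List.range t).reverse.foldl
          (fun nb i => pvInner nb i ((board.getD i []).length)) nb).length = board.length ∧
        (∀ k, (((List.range t).reverse.foldl
            (fun nb i => pvInner nb i ((board.getD i []).length)) nb).getD k []).length =
          (board.getD k []).length) ∧
        ∀ c, pvGetCol ((List.range t).reverse.foldl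
            (fun nb i => pvInner nb i ((board.getD i []).length)) nb) c =
          (List.range t).reverse.foldl colStep (pvGetCol nb c) := by
  intro t
  induction t with
  | zero =>
    intro _ nb h1 h2
    exact ⟨by simpa using h1, fun k => by simpa using h2 k, fun c => by simp⟩
  | succ t ih =>
    intro ht nb h1 h2
    have hrev : (List.range (t+1)).reverse = t :: (List.range t).reverse := by
      rw [List.range_succ, List.reverse_append]; rfl
    have htn : t < nb.length := by omega
    obtain ⟨iLen, iRows, iCols⟩ := inner_cols htn ((board.getD t []).length)
    rw [hrev]
    simp only [List.foldl_cons]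
    have hbc : ∀ c, pvGetCol (pvInner nb t ((board.getD t []).length)) c =
        colStep (pvGetCol nb c) t := by
      intro c
      rw [iCols c]
      by_cases hc : c < (board.getD t []).length
      · rw [if_pos hc]
      · rw [if_neg hc]
        exact (colStep_id_of_ge (by rw [h2 t]; omega)).symm
    obtain ⟨oLen, oRows, oCols⟩ := ih (by omega) (pvInner nb t ((board.getD t []).length))
      (by rw [iLen, h1]) (fun k => by rw [iRows k, h2 k])
    refine ⟨oLen, oRows, fun c => ?_⟩
    rw [oCols c, hbc c]

-- ---------- tiltGo / tiltSeg facts ----------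

lemma tiltGo_pure (l : List String) (hp : ∀ x ∈ l, x = "." ∨ x = "O") :
    ∀ acc, tiltGo acc l = tiltSeg (acc ++ l) := by
  induction l with
  | nil => intro acc; simp [tiltGo]
  | cons c cs ih =>
    intro acc
    simp only [tiltGo, if_pos (hp c (by simp))]
    rw [ih (fun x hx => hp x (by simp [hx])) (acc ++ [c])]
    simp

lemma tiltGo_split (seg : List String) (hp : ∀ x ∈ seg, x = "." ∨ x = "O") {b : String}
    (hb : ¬(b = "." ∨ b = "O")) (rest : List String) :
    ∀ acc, tiltGo acc (seg ++ b :: rest) = tiltSeg (acc ++ seg) ++ b :: tiltGo [] rest := by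
  induction seg with
  | nil => intro acc; rw [List.nil_append]; simp only [tiltGo, if_neg hb]; simp
  | cons x xs ih =>
    intro acc
    rw [List.cons_append]
    simp only [tiltGo, if_pos (hp x (by simp))]
    rw [ih (fun y hy => hp y (by simp [hy])) (acc ++ [x])]
    simp

-- ---------- colStep arithmetic on concrete shapes ----------

lemma getD_append_len (p l : List String) (k : Nat) (d : String) :
    (p ++ l).getD (p.length + k) d = l.getD k d := by
  rw [List.getD_eq_getElem?_getD, List.getD_eq_getElem?_getD,
    List.getElem?_append_right (Nat.le_add_right _ _), Nat.add_sub_cancel_left]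

lemma set_append_len (p l : List String) (k : Nat) (v : String) :
    (p ++ l).set (p.length + k) v = p ++ l.set k v := by
  simp

lemma drop_append_len (p l : List String) (k : Nat) :
    (p ++ l).drop (p.length + k) = l.drop k := by
  exact List.drop_length_add_append k

lemma ld_rep_stop (tail : List String) (ht : tail.getD 0 "" ≠ ".") :
    ∀ d : Nat, ld (List.replicate d "." ++ tail) = d := by
  have h0 : ld tail = 0 := by
    cases tail with
    | nil => simp [ld]
    | cons h t =>
      have hh : (h == ".") = false := beq_eq_false_iff_ne.mpr (by simpa using ht)
      simp [ld, hh]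
  intro d
  induction d with
  | zero => simpa using h0
  | succ d ih =>
    rw [List.replicate_succ, List.cons_append]
    show (List.takeWhile (fun x => x == ".")
        (("." : String) :: (List.replicate d "." ++ tail))).length = d + 1
    rw [List.takeWhile_cons_of_pos (by simp)]
    simp only [List.length_cons]
    rw [show (List.takeWhile (fun x => x == ".") (List.replicate d "." ++ tail)).length = d
      from ih]

-- shifting colStep past an untouched prefix
lemma colStep_shift (p rest : List String) (k : Nat) :
    colStep (p ++ rest) (p.length + k) = p ++ colStep rest k := by
  have hg : (p ++ rest).getD (p.length + k) "" = rest.getD k "" := getD_append_len p rest k ""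
  have hd : (p ++ rest).drop (p.length + k + 1) = rest.drop (k + 1) := by
    rw [Nat.add_assoc]
    exact drop_append_len p rest (k+1)
  simp only [colStep, hg, hd]
  split
  · rw [set_append_len, Nat.add_assoc, set_append_len]
  · rfl

lemma fold_colStep_shift (p : List String) (idxs : List Nat) :
    ∀ rest, (idxs.map (fun k => p.length + k)).foldl colStep (p ++ rest) =
      p ++ idxs.foldl colStep rest := by
  induction idxs with
  | nil => intro rest; simp
  | cons k ks ih =>
    intro rest
    simp only [List.map_cons, List.foldl_cons]
    rw [colStep_shift p rest k, ih (colStep rest k)]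

-- ---------- the 1-D core: a pure run settles to tiltSeg ----------

lemma set_replicate_last : ∀ d : Nat,
    (List.replicate (d+1) (("." : String))).set d "O" = List.replicate d "." ++ ["O"] := by
  intro d
  induction d with
  | zero => rfl
  | succ d ih =>
    rw [List.replicate_succ, List.set_cons_succ]
    rw [ih]
    simp [List.replicate_succ]

lemma tiltSeg_snoc_O (front : List String) (d : Nat) :
    tiltSeg (front ++ "O" :: List.replicate d ".") =
      tiltSeg (front ++ List.replicate d ".") ++ ["O"] := by
  have hc : front.count "O" ≤ front.length := List.count_le_length
  simp only [tiltSeg, List.count_append, List.length_append, List.count_cons,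
    List.count_replicate, List.length_cons, List.length_replicate]
  simp
  rw [show front.length + (d + 1) - (List.count "O" front + 1) =
      front.length + d - List.count "O" front by omega]
  rw [List.replicate_succ']

lemma run_settles : ∀ (s : Nat) (seg : List String) (d : Nat) (tail : List String),
    seg.length = s →
    (∀ x ∈ seg, x = "." ∨ x = "O") → tail.getD 0 "" ≠ "." →
    (List.range s).reverse.foldl colStep (seg ++ List.replicate d "." ++ tail) =
      tiltSeg (seg ++ List.replicate d ".") ++ tail := by
  intro s
  induction s with
  | zero =>
    intro seg d tail hlen hp ht
    cases seg with
    | cons x xs => simp at hlen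
    | nil =>
      simp [tiltSeg, List.count_replicate]
  | succ s ih =>
    intro seg d tail hlen hp ht
    rcases List.eq_nil_or_concat seg with rfl | ⟨front, last, rfl⟩
    · simp at hlen
    simp only [List.concat_eq_append] at hlen hp ⊢
    have hf : front.length = s := by
      simp at hlen
      omega
    have hfp : ∀ x ∈ front, x = "." ∨ x = "O" := fun x hx => hp x (by simp [hx])
    have hrev : (List.range (s+1)).reverse = s :: (List.range s).reverse := by
      rw [List.range_succ, List.reverse_append]; rfl
    rw [hrev]
    simp only [List.foldl_cons]
    have hstate : front ++ [last] ++ List.replicate d "." ++ tail =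
        front ++ (last :: (List.replicate d "." ++ tail)) := by simp
    rw [hstate]
    have hget : (front ++ (last :: (List.replicate d "." ++ tail))).getD s "" = last := by
      rw [← hf, show front.length = front.length + 0 from rfl, getD_append_len]
      rfl
    rcases hp last (by simp) with hlast | hlast
    · -- last = "."
      have hnotO : (front ++ (last :: (List.replicate d "." ++ tail))).getD s "" ≠ "O" := by
        rw [hget, hlast]; decide
      rw [show colStep (front ++ (last :: (List.replicate d "." ++ tail))) s =
          front ++ (last :: (List.replicate d "." ++ tail)) from by
        simp only [colStep]
        rw [if_neg hnotO]]
      have hre : front ++ (last :: (List.replicate d "." ++ tail)) =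
          front ++ List.replicate (d+1) "." ++ tail := by
        rw [hlast]
        simp [List.replicate_succ]
      rw [hre, ih front (d+1) tail hf hfp ht]
      congr 2
      rw [hlast]
      simp [List.replicate_succ]
    · -- last = "O"
      have hdrop : (front ++ (last :: (List.replicate d "." ++ tail))).drop (s + 1) =
          List.replicate d "." ++ tail := by
        rw [show (front ++ (last :: (List.replicate d "." ++ tail))) =
            (front ++ [last]) ++ (List.replicate d "." ++ tail) by simp]
        rw [show s + 1 = (front ++ [last]).length + 0 by simp [hf]]
        rw [drop_append_len]
        rfl
      have hld : ld ((front ++ (last :: (List.replicate d "." ++ tail))).drop (s + 1)) = d := by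
        rw [hdrop]; exact ld_rep_stop tail ht d
      have hcond : (front ++ (last :: (List.replicate d "." ++ tail))).getD s "" = "O" := by
        rw [hget, hlast]
      have hset1 : (front ++ (last :: (List.replicate d "." ++ tail))).set s "." =
          front ++ ("." :: (List.replicate d "." ++ tail)) := by
        rw [← hf, show front.length = front.length + 0 from rfl, set_append_len]
        rfl
      have hset2 : (front ++ ("." :: (List.replicate d "." ++ tail))).set (s + d) "O" =
          front ++ (List.replicate d "." ++ ("O" :: tail)) := by
        rw [← hf, set_append_len]
        congr 1
        rw [show ("." :: (List.replicate d "." ++ tail)) =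
            List.replicate (d+1) "." ++ tail by simp [List.replicate_succ]]
        rw [List.set_append_left _ _ (by simp)]
        rw [set_replicate_last]
        simp
      rw [show colStep (front ++ (last :: (List.replicate d "." ++ tail))) s =
          front ++ (List.replicate d "." ++ ("O" :: tail)) from by
        simp only [colStep]
        rw [if_pos hcond, hld, hset1, hset2]]
      rw [show front ++ (List.replicate d "." ++ ("O" :: tail)) =
          front ++ List.replicate d "." ++ ("O" :: tail) by simp]
      rw [ih front d ("O" :: tail) hf hfp (by simp)]
      rw [hlast]
      rw [show front ++ ["O"] ++ List.replicate d "." =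
          front ++ "O" :: List.replicate d "." by simp]
      rw [tiltSeg_snoc_O]
      simp

lemma range_rev_split (s rl : Nat) :
    (List.range (s + 1 + rl)).reverse =
      ((List.range rl).reverse.map (fun k => s + 1 + k)) ++ s :: (List.range s).reverse := by
  rw [List.range_add, List.reverse_append, List.range_succ, List.reverse_append]
  simp

lemma dropWhile_head_false {p : String → Bool} {b : String} {t : List String} :
    ∀ l : List String, l.dropWhile p = b :: t → p b = false := by
  intro l
  induction l with
  | nil => intro h; simp [List.dropWhile] at h
  | cons x xs ih =>
    intro h
    rw [List.dropWhile_cons] at h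
    by_cases hx : p x
    · rw [if_pos hx] at h; exact ih h
    · rw [if_neg hx] at h
      obtain ⟨rfl, -⟩ := List.cons.injEq .. ▸ h
      simpa using hx

-- the 1-D theorem: A's per-column effect is B's _tilt_col
lemma colPass_eq_tiltCol : ∀ (fuel : Nat) (col : List String), col.length ≤ fuel →
    colPass col = tiltCol col := by
  intro fuel
  induction fuel with
  | zero =>
    intro col hlen
    cases col with
    | nil => rfl
    | cons x xs => simp at hlen
  | succ fuel ih =>
    intro col hlen
    set pb : String → Bool := fun x => x == "." || x == "O" with hpb
    have hsplit : col.takeWhile pb ++ col.dropWhile pb = col := List.takeWhile_append_dropWhile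
    have hpure : ∀ x ∈ col.takeWhile pb, x = "." ∨ x = "O" := by
      intro x hx
      have := List.mem_takeWhile_imp hx
      simpa [hpb] using this
    cases hrest : col.dropWhile pb with
    | nil =>
      have hcol : col = col.takeWhile pb := by
        have h9 := hsplit
        rw [hrest, List.append_nil] at h9
        exact h9.symm
      have hpure' : ∀ x ∈ col, x = "." ∨ x = "O" := by rw [hcol]; exact hpure
      have h0 := run_settles col.length col 0 [] rfl hpure' (by simp)
      simp only [List.replicate_zero, List.append_nil] at h0
      rw [colPass, h0, tiltCol, tiltGo_pure col hpure' []]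
      simp
    | cons b rest' =>
      have hb : ¬ (b = "." ∨ b = "O") := by
        have := dropWhile_head_false col hrest
        simpa [hpb] using this
      have hcol : col = col.takeWhile pb ++ b :: rest' := by
        have h9 := hsplit
        rw [hrest] at h9
        exact h9.symm
      set seg := col.takeWhile pb with hseg
      have hlencol : col.length = seg.length + 1 + rest'.length := by
        rw [hcol]; simp; omega
      have hrl : rest'.length ≤ fuel := by omega
      rw [colPass, hlencol, range_rev_split seg.length rest'.length]
      rw [List.foldl_append]
      have hshift : ((List.range rest'.length).reverse.map
            (fun k => seg.length + 1 + k)).foldl colStep (col) =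
          (seg ++ [b]) ++ (List.range rest'.length).reverse.foldl colStep rest' := by
        rw [hcol]
        rw [show seg ++ b :: rest' = (seg ++ [b]) ++ rest' by simp]
        rw [show (fun k => seg.length + 1 + k) = (fun k => (seg ++ [b]).length + k) by
          funext k; simp]
        exact fold_colStep_shift (seg ++ [b]) (List.range rest'.length).reverse rest'
      rw [hshift]
      have hpass : (List.range rest'.length).reverse.foldl colStep rest' = tiltCol rest' := by
        rw [← colPass]
        exact ih rest' hrl
      rw [hpass]
      simp only [List.foldl_cons]
      have hstate : (seg ++ [b]) ++ tiltCol rest' = seg ++ (b :: tiltCol rest') := by simp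
      rw [hstate]
      have hget : (seg ++ (b :: tiltCol rest')).getD seg.length "" = b := by
        rw [show seg.length = seg.length + 0 from rfl, getD_append_len]; rfl
      have hnotO : (seg ++ (b :: tiltCol rest')).getD seg.length "" ≠ "O" := by
        rw [hget]; intro hcontra; exact hb (Or.inr hcontra)
      rw [show colStep (seg ++ (b :: tiltCol rest')) seg.length =
          seg ++ (b :: tiltCol rest') from by
        simp only [colStep]
        rw [if_neg hnotO]]
      have hbd : (b :: tiltCol rest').getD 0 "" ≠ "." := by
        intro hcontra
        exact hb (Or.inl (by simpa using hcontra))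
      have hrun := run_settles seg.length seg 0 (b :: tiltCol rest') rfl hpure hbd
      simp only [List.replicate_zero, List.append_nil] at hrun
      rw [hrun]
      have hfin : tiltCol col = tiltSeg seg ++ b :: tiltCol rest' := by
        rw [hcol]
        unfold tiltCol
        rw [tiltGo_split seg hpure hb rest' []]
        simp
      rw [hfin]

-- ---------- assembling the 2-D claim ----------

lemma shiftSouth_cols (board : List (List String)) :
    (shiftSouth board).length = board.length ∧
      (∀ k, ((shiftSouth board).getD k []).length = (board.getD k []).length) ∧
      ∀ c, pvGetCol (shiftSouth board) c = tiltCol (pvGetCol board c) := by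
  obtain ⟨h1, h2, h3⟩ := outer_cols (board := board) board.length le_rfl board rfl
    (fun k => rfl)
  unfold shiftSouth
  refine ⟨h1, h2, fun c => ?_⟩
  rw [h3 c]
  rw [← show (pvGetCol board c).length = board.length from len_col board c, ← colPass]
  exact colPass_eq_tiltCol (pvGetCol board c).length _ le_rfl

lemma le_foldl_max : ∀ (l : List (List String)) (a : Nat),
    a ≤ l.foldl (fun acc row => max acc row.length) a := by
  intro l
  induction l with
  | nil => intro a; simp
  | cons r rs ih =>
    intro a
    simp only [List.foldl_cons]
    exact le_trans (Nat.le_max_left a r.length) (ih (max a r.length))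

lemma getD_le_foldl_max : ∀ (l : List (List String)) (a i : Nat),
    (l.getD i []).length ≤ l.foldl (fun acc row => max acc row.length) a := by
  intro l
  induction l with
  | nil => intro a i; simp
  | cons r rs ih =>
    intro a i
    cases i with
    | zero =>
      simp only [List.getD_cons_zero, List.foldl_cons]
      exact le_trans (Nat.le_max_right a r.length) (le_foldl_max rs (max a r.length))
    | succ i =>
      simp only [List.getD_cons_succ, List.foldl_cons]
      exact ih (max a r.length) i

lemma rowLen_le_width (board : List (List String)) (i : Nat) :
    (board.getD i []).length ≤ pvWidth board :=
  getD_le_foldl_max board 0 i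

lemma alt_eq (board : List (List String)) :
    shiftSouth_alt board = (List.range board.length).map (fun i =>
      (List.range ((board.getD i []).length)).map (fun j =>
        (tiltCol (pvGetCol board j)).getD i "")) := by
  unfold shiftSouth_alt
  apply List.map_congr_left
  intro i _
  apply List.map_congr_left
  intro j hj
  have hj1 : j < (board.getD i []).length := by simpa using hj
  have hjw : j < pvWidth board := lt_of_lt_of_le hj1 (rowLen_le_width board i)
  congr 1
  rw [List.getD_eq_getElem?_getD, List.getElem?_map, List.getElem?_range hjw]
  rfl

-- ===== VERDICT (by name: the statement is the Claim_ definition above) =====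
theorem shiftSouth_spec : Claim_equal_shiftSouth := by
  intro board _ _
  unfold Spec_shiftSouth
  obtain ⟨hAlen, hArow, hAcols⟩ := shiftSouth_cols board
  rw [alt_eq board]
  apply List.ext_getElem
  · rw [hAlen]; simp
  · intro i h1 h2
    simp only [List.getElem_map, List.getElem_range]
    apply List.ext_getElem
    · rw [← getD_eq_getElem_of_lt _ h1 [], hArow i]
      simp
    · intro j hj1 hj2
      simp only [List.getElem_map, List.getElem_range]
      have hA2 : ((shiftSouth board)[i]).getD j "" = (shiftSouth board)[i][j] :=
        getD_eq_getElem_of_lt _ hj1 ""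
      have hA1 : (shiftSouth board).getD i [] = (shiftSouth board)[i] :=
        getD_eq_getElem_of_lt _ h1 []
      rw [← hA2, ← hA1, ← getD_col, hAcols j]
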